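-- pv_equiv track=rewrite | github.com/IgrMd/yandex-algos-training | Тренировки по алгоритмам 3.0/Дивизион B/Тема 3. Динамическое программирование с одним параметром/22.py | grasshopper
-- ===== SOURCE A (Python) =====
-- def grasshopper(n, k):
--     answ = [0] * n
--     answ[0] = 1
--     for i in range(1, n):
--         j = 1
--         while j <= k and i - j >= 0:
--             answ[i] += answ[i - j]
--             j += 1
--     return answ[-1]
-- ===== SOURCE B (Python) =====
-- def grasshopper(n, k):
--     # O(n) sliding-window DP: dp[i] = sum of previous min(k, i) dp values,
--     # maintained as a running window sum instead of re-summing k predecessors.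
--     if k <= 0:
--         return 1 if n == 1 else 0
--     dp = [0] * n
--     dp[0] = 1
--     window = 0
--     for i in range(1, n):
--         window += dp[i - 1]
--         if i > k:
--             window -= dp[i - 1 - k]
--         dp[i] = window
--     return dp[-1]
-- ===== Notes on version B (the rewrite author's own statement) =====
-- stated objective: faster
-- what changed: Replaces A's inner while-loop that re-sums up to k predecessors at every cell by a single pass maintaining a sliding-window running sum (add dp[i-1], drop dp[i-1-k]), turning O(n*k) into O(n).
import Mathlib
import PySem

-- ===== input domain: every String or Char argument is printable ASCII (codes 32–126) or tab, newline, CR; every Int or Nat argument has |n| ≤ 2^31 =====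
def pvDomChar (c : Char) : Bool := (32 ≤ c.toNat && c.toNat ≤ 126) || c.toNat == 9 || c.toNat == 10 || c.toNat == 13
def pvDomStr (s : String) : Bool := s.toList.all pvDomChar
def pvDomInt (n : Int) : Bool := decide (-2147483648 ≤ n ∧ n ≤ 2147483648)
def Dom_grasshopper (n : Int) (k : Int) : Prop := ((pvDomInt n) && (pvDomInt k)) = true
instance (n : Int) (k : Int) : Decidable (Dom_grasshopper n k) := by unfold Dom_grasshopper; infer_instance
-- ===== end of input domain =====

-- B replaces A's O(n·k) re-summation of up to k predecessors by an O(n) sliding-window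
-- running sum; return values agree on all n ≥ 1 (A raises IndexError for n ≤ 0).

-- ===== PORT A =====
-- inner 'while j <= k and i - j >= 0: answ[i] += answ[i-j]; j += 1'
def grassPartA (answ : List Int) (i : Nat) (k : Int) (j : Int) : List Int :=
  if h : j ≤ k ∧ (i : Int) - j ≥ 0 then
    grassPartA (answ.set i (answ.getD i 0 + answ.getD ((i : Int) - j).toNat 0)) i k (j + 1)
  else answ
termination_by ((i : Int) - j + 1).toNat
decreasing_by omega

def grasshopper (n : Int) (k : Int) : Int :=
  let answ0 := (List.replicate n.toNat (0 : Int)).set 0 1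
  let answ := (PySem.List.pyRange 1 n 1).foldl (fun acc i => grassPartA acc i.toNat k 1) answ0
  PySem.List.pyGetD answ (-1) 0

-- ===== PORT B =====
def grasshopper_alt (n : Int) (k : Int) : Int :=
  if k ≤ 0 then (if n = 1 then 1 else 0)
  else
    let dp0 := (List.replicate n.toNat (0 : Int)).set 0 1
    let st := (PySem.List.pyRange 1 n 1).foldl
      (fun (st : List Int × Int) i =>
        let w1 := st.2 + st.1.getD (i - 1).toNat 0
        let w2 := if i > k then w1 - st.1.getD (i - 1 - k).toNat 0 else w1
        (st.1.set i.toNat w2, w2)) (dp0, 0)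
    PySem.List.pyGetD st.1 (-1) 0

-- ===== PRECONDITION & SPEC =====
-- Pre_ excludes n ≤ 0, where A raises IndexError on 'answ[0] = 1' (the list is empty).
def Pre_grasshopper (n : Int) (k : Int) : Prop := 1 ≤ n
instance (n : Int) (k : Int) : Decidable (Pre_grasshopper n k) := by unfold Pre_grasshopper; infer_instance
def pvWitness_grasshopper : Int × Int := (5, 2)

def Spec_grasshopper (n : Int) (k : Int) (out : Int) : Prop := out = grasshopper_alt n k
instance (n : Int) (k : Int) (out : Int) : Decidable (Spec_grasshopper n k out) := by unfold Spec_grasshopper; infer_instance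

-- ===== CLAIM (what is proved, stated in full; the proofs are below) =====
def Claim_equal_grasshopper : Prop := ∀ (n : Int) (k : Int), Dom_grasshopper n k → Pre_grasshopper n k → Spec_grasshopper n k (grasshopper n k)

-- ===== LEMMAS AND PROOFS =====

-- sum answ[i-j] + answ[i-(j+1)] + …  while j' ≤ k and i - j' ≥ 0 (the quantity A's inner loop adds)
def partSum (l : List Int) (i : Nat) (k : Int) (j : Int) : Int :=
  if h : j ≤ k ∧ (i : Int) - j ≥ 0 then
    l.getD ((i : Int) - j).toNat 0 + partSum l i k (j + 1)
  else 0
termination_by ((i : Int) - j + 1).toNat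
decreasing_by omega

-- reference DP table
def dpRef (k : Int) : Nat → List Int
  | 0 => []
  | 1 => [1]
  | (m + 2) => dpRef k (m + 1) ++ [partSum (dpRef k (m + 1)) (m + 1) k 1]

theorem dpRef_length (k : Int) (m : Nat) : (dpRef k m).length = m := by
  match m with
  | 0 => rfl
  | 1 => rfl
  | (m + 2) => simp [dpRef, dpRef_length k (m + 1)]

theorem dpRef_succ (k : Int) (m : Nat) (hm : 1 ≤ m) :
    dpRef k (m + 1) = dpRef k m ++ [partSum (dpRef k m) m k 1] := by
  obtain ⟨m', rfl⟩ : ∃ m', m = m' + 1 := ⟨m - 1, by omega⟩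
  rfl

theorem getD_append_lt (l t : List Int) (i : Nat) (d : Int) (h : i < l.length) :
    (l ++ t).getD i d = l.getD i d := by
  simp [List.getD, List.getElem?_append_left h]

theorem getD_append_len (l t : List Int) (x d : Int) (i : Nat) (h : i = l.length) :
    (l ++ x :: t).getD i d = x := by
  subst h
  simp [List.getD]

theorem set_append_len (l t : List Int) (x v : Int) (i : Nat) (h : i = l.length) :
    (l ++ x :: t).set i v = l ++ v :: t := by
  subst h
  induction l with
  | nil => rfl
  | cons a l ih => simp [ih]

theorem set_getD_self (l : List Int) (i : Nat) (h : i < l.length) :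
    l.set i (l.getD i 0) = l := by
  rw [List.getD_eq_getElem l 0 h, List.set_getElem_self]

theorem partSum_congr (l l' : List Int) (i : Nat) (k : Int) (j : Int) (hj : 1 ≤ j)
    (hag : ∀ t, t < i → l.getD t 0 = l'.getD t 0) :
    partSum l i k j = partSum l' i k j := by
  conv_lhs => rw [partSum]
  conv_rhs => rw [partSum]
  split_ifs with h
  · rw [hag _ (by omega), partSum_congr l l' i k (j + 1) (by omega) hag]
  · rfl
termination_by ((i : Int) - j + 1).toNat
decreasing_by omega

theorem grassPartA_eq (l : List Int) (i : Nat) (k : Int) (j : Int) (hj : 1 ≤ j)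
    (hi : i < l.length) :
    grassPartA l i k j = l.set i (l.getD i 0 + partSum l i k j) := by
  conv_lhs => rw [grassPartA]
  conv_rhs => rw [partSum]
  split_ifs with h
  · have hlen : i < (l.set i (l.getD i 0 + l.getD ((i : Int) - j).toNat 0)).length := by
      simpa using hi
    rw [grassPartA_eq _ i k (j + 1) (by omega) hlen]
    have hne : ((i : Int) - j).toNat ≠ i := by omega
    rw [partSum_congr (l.set i (l.getD i 0 + l.getD ((i : Int) - j).toNat 0)) l i k (j + 1) (by omega)
      (by intro t ht; simp [List.getD, List.getElem?_set_ne (by omega : i ≠ t)])]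
    rw [List.set_set]
    congr 1
    rw [List.getD_eq_getElem _ 0 hlen, List.getElem_set_self (by simpa using hi)]
    ring
  · rw [add_zero, set_getD_self l i hi]
termination_by ((i : Int) - j + 1).toNat
decreasing_by omega

theorem partSum_to_sum (l : List Int) (i : Nat) (k : Int) (hk : 1 ≤ k) (jN : Nat) (hj : 1 ≤ jN) :
    partSum l i k (jN : Int) = ∑ j ∈ Finset.Ico jN (min k.toNat i + 1), l.getD (i - j) 0 := by
  rw [partSum]
  split_ifs with h
  · have hle : jN ≤ min k.toNat i := by omega
    have : ((jN : Int) + 1) = ((jN + 1 : Nat) : Int) := by push_cast; ring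
    rw [this, partSum_to_sum l i k hk (jN + 1) (by omega)]
    rw [Finset.sum_eq_sum_Ico_succ_bot (by omega : jN < min k.toNat i + 1)]
    congr 1
    congr 1
    omega
  · have : min k.toNat i + 1 ≤ jN := by omega
    rw [Finset.Ico_eq_empty (by omega), Finset.sum_empty]
termination_by (min k.toNat i + 1 - jN)
decreasing_by omega

theorem partSum_one (l : List Int) (i : Nat) (k : Int) (hk : 1 ≤ k) :
    partSum l i k 1 = ∑ t ∈ Finset.Ico (i - k.toNat) i, l.getD t 0 := by
  have h1 := partSum_to_sum l i k hk 1 le_rfl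
  rw [show ((1 : Nat) : Int) = 1 from rfl] at h1
  rw [h1, Finset.sum_Ico_reflect (fun t => l.getD t 0) 1 (by omega : min k.toNat i + 1 ≤ i + 1)]
  congr 1
  congr 1 <;> omega

theorem partSum_window (l : List Int) (k : Int) (hk : 1 ≤ k) (m : Nat) (hm : 1 ≤ m) :
    partSum l m k 1 = partSum l (m - 1) k 1 + l.getD (m - 1) 0 -
      (if (m : Int) > k then l.getD ((m : Int) - 1 - k).toNat 0 else 0) := by
  obtain ⟨m', rfl⟩ : ∃ m', m = m' + 1 := ⟨m - 1, by omega⟩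
  rw [show m' + 1 - 1 = m' from by omega]
  rw [partSum_one l (m' + 1) k hk, partSum_one l m' k hk]
  by_cases h : ((m' + 1 : Nat) : Int) > k
  · rw [if_pos h]
    have hkm : k.toNat ≤ m' := by omega
    rw [show (((m' + 1 : Nat) : Int) - 1 - k).toNat = m' - k.toNat from by omega]
    rw [Finset.sum_Ico_succ_top (show m' + 1 - k.toNat ≤ m' from by omega)]
    rw [Finset.sum_eq_sum_Ico_succ_bot (show m' - k.toNat < m' from by omega)]
    rw [show m' - k.toNat + 1 = m' + 1 - k.toNat from by omega]
    ring
  · rw [if_neg h]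
    rw [show m' + 1 - k.toNat = 0 from by omega, show m' - k.toNat = 0 from by omega]
    rw [Finset.sum_Ico_succ_top (Nat.zero_le m')]
    ring

theorem partSum_zero_i (l : List Int) (k : Int) : partSum l 0 k 1 = 0 := by
  rw [partSum]
  simp

theorem init_eq (N : Nat) (hN : 1 ≤ N) :
    (List.replicate N (0 : Int)).set 0 1 = dpRef 0 1 ++ List.replicate (N - 1) 0 := by
  obtain ⟨N', rfl⟩ : ∃ N', N = N' + 1 := ⟨N - 1, by omega⟩
  simp [List.replicate_succ, dpRef]

theorem loopA (k : Int) (hk : 1 ≤ k) (N : Nat) (m : Nat) (hm : 1 ≤ m) (hmN : m ≤ N) :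
    (PySem.List.pyRange 1 (m : Int) 1).foldl (fun acc i => grassPartA acc i.toNat k 1)
      ((List.replicate N (0 : Int)).set 0 1)
    = dpRef k m ++ List.replicate (N - m) 0 := by
  induction m with
  | zero => omega
  | succ m ih =>
    by_cases hm0 : m = 0
    · subst hm0
      rw [PySem.List.pyRange_one_eq_nil (by norm_num), List.foldl_nil, init_eq N (by omega)]
      rfl
    · have hm1 : 1 ≤ m := by omega
      have hr : PySem.List.pyRange 1 ((m + 1 : Nat) : Int) 1
          = PySem.List.pyRange 1 (m : Int) 1 ++ [(m : Int)] := by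
        push_cast
        exact PySem.List.pyRange_one_succ_right (by omega)
      rw [hr, List.foldl_append, ih hm1 (by omega), List.foldl_cons, List.foldl_nil]
      have hlm : (dpRef k m).length = m := dpRef_length k m
      have htn : ((m : Int)).toNat = m := by omega
      have hlen : m < (dpRef k m ++ List.replicate (N - m) 0).length := by
        rw [List.length_append, hlm, List.length_replicate]; omega
      rw [htn, grassPartA_eq _ m k 1 le_rfl hlen]
      obtain ⟨r, hr2⟩ : ∃ r, N - m = r + 1 := ⟨N - m - 1, by omega⟩
      rw [hr2, List.replicate_succ]
      rw [partSum_congr (dpRef k m ++ (0 : Int) :: List.replicate r 0) (dpRef k m) m k 1 le_rfl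
        (by intro t ht; exact getD_append_lt _ _ _ _ (by omega))]
      rw [getD_append_len _ _ _ _ m hlm.symm, set_append_len _ _ _ _ m hlm.symm, zero_add]
      rw [dpRef_succ k m hm1, show N - (m + 1) = r from by omega, List.append_assoc]
      rfl

theorem loopB (k : Int) (hk : 1 ≤ k) (N : Nat) (m : Nat) (hm : 1 ≤ m) (hmN : m ≤ N) :
    (PySem.List.pyRange 1 (m : Int) 1).foldl
      (fun (st : List Int × Int) i =>
        let w1 := st.2 + st.1.getD (i - 1).toNat 0
        let w2 := if i > k then w1 - st.1.getD (i - 1 - k).toNat 0 else w1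
        (st.1.set i.toNat w2, w2))
      (((List.replicate N (0 : Int)).set 0 1), 0)
    = (dpRef k m ++ List.replicate (N - m) 0, partSum (dpRef k m) (m - 1) k 1) := by
  induction m with
  | zero => omega
  | succ m ih =>
    by_cases hm0 : m = 0
    · subst hm0
      rw [PySem.List.pyRange_one_eq_nil (by norm_num), List.foldl_nil, init_eq N (by omega)]
      rw [show partSum (dpRef k (0 + 1)) (0 + 1 - 1) k 1 = 0 from partSum_zero_i _ k]
      rfl
    · have hm1 : 1 ≤ m := by omega
      have hr : PySem.List.pyRange 1 ((m + 1 : Nat) : Int) 1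
          = PySem.List.pyRange 1 (m : Int) 1 ++ [(m : Int)] := by
        push_cast
        exact PySem.List.pyRange_one_succ_right (by omega)
      rw [hr, List.foldl_append, ih hm1 (by omega), List.foldl_cons, List.foldl_nil]
      simp only []
      have hlm : (dpRef k m).length = m := dpRef_length k m
      have htn : ((m : Int)).toNat = m := by omega
      have ht1 : ((m : Int) - 1).toNat = m - 1 := by omega
      obtain ⟨r, hr2⟩ : ∃ r, N - m = r + 1 := ⟨N - m - 1, by omega⟩
      rw [hr2, List.replicate_succ, htn, ht1]
      -- the two reads hit the dpRef prefix
      rw [getD_append_lt _ _ (m - 1) 0 (by omega)]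
      have hw2 : (if (m : Int) > k then
            partSum (dpRef k m) (m - 1) k 1 + (dpRef k m).getD (m - 1) 0 -
              (dpRef k m ++ (0 : Int) :: List.replicate r 0).getD ((m : Int) - 1 - k).toNat 0
          else partSum (dpRef k m) (m - 1) k 1 + (dpRef k m).getD (m - 1) 0)
          = partSum (dpRef k m) m k 1 := by
        rw [partSum_window (dpRef k m) k hk m hm1]
        split_ifs with hc
        · rw [getD_append_lt _ _ (((m : Int) - 1 - k).toNat) 0 (by omega)]
        · ring
      rw [hw2, set_append_len _ _ _ _ m hlm.symm, show N - (m + 1) = r from by omega,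
        dpRef_succ k m hm1]
      have hps : partSum (dpRef k m ++ [partSum (dpRef k m) m k 1]) (m + 1 - 1) k 1
          = partSum (dpRef k m) m k 1 := by
        refine partSum_congr _ _ m k 1 le_rfl ?_
        intro t ht
        exact getD_append_lt _ _ t 0 (by omega)
      rw [hps, List.append_assoc]
      rfl

theorem loopA_trivial (k : Int) (hk : k ≤ 0) (l : List Int) (init : List Int) :
    l.foldl (fun acc (i : Int) => grassPartA acc i.toNat k 1) init = init := by
  induction l generalizing init with
  | nil => rfl
  | cons a l ih =>
    rw [List.foldl_cons, grassPartA, dif_neg (by omega), ih]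

-- ===== VERDICT (by name: the statement is the Claim_ definition above) =====
theorem getLast_cons_rep (x : Int) (r : Nat) :
    ((x :: List.replicate r (0 : Int)).getLast (by simp)) = if r = 0 then x else 0 := by
  induction r generalizing x with
  | zero => simp
  | succ r ih =>
    rw [List.replicate_succ, List.getLast_cons (by simp), ih 0]
    simp

theorem grasshopper_spec : Claim_equal_grasshopper := by
  intro n k _ hpre
  unfold Spec_grasshopper grasshopper grasshopper_alt
  have hn : 1 ≤ n := hpre
  by_cases hk : k ≤ 0
  · rw [if_pos hk]
    simp only []
    rw [loopA_trivial k hk]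
    obtain ⟨N', hN⟩ : ∃ N', n.toNat = N' + 1 := ⟨n.toNat - 1, by omega⟩
    rw [hN, List.replicate_succ, List.set_cons_zero]
    rw [PySem.List.pyGetD_neg_one _ _ (by simp), getLast_cons_rep]
    split_ifs <;> omega
  · rw [if_neg hk]
    have hk1 : 1 ≤ k := by omega
    have hnn : n = ((n.toNat : Nat) : Int) := by omega
    rw [hnn]
    simp only [Int.toNat_natCast]
    rw [loopA k hk1 n.toNat n.toNat (by omega) le_rfl,
      loopB k hk1 n.toNat n.toNat (by omega) le_rfl]
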